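-- pv_equiv track=rewrite | github.com/vocaroo/appcontrol | remote-scripts/control_utils.py | getServersByHost
-- ===== SOURCE A (Python) =====
-- def getServersByHost(servers): # group by IP
-- 	serversByHost = {}
--
-- 	for server in servers:
-- 		host = hostFromServer(server)
--
-- 		if host in serversByHost:
-- 			serversByHost[host].append(server)
-- 		else:
-- 			serversByHost[host] = [server]
--
-- 	return serversByHost
--
-- def hostFromServer(server):
-- 	assert("ipv6" in server or "ipv4" in server)
--
-- 	if "ipv6" in server:
-- 		return server["ipv6"]
-- 	else:
-- 		return server["ipv4"]
-- ===== SOURCE B (Python) =====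
-- def getServersByHost(servers): # group by IP
-- 	# dedup-then-collect: compute all hosts once, take the distinct hosts in
-- 	# first-seen order, then collect each host's servers in one filtering pass
-- 	hosts = [hostFromServer(s) for s in servers]
-- 	return {h: [s for s, hh in zip(servers, hosts) if hh == h]
-- 	        for h in dict.fromkeys(hosts)}
--
-- def hostFromServer(server):
-- 	assert("ipv6" in server or "ipv4" in server)
--
-- 	if "ipv6" in server:
-- 		return server["ipv6"]
-- 	else:
-- 		return server["ipv4"]
-- ===== Notes on version B (the rewrite author's own statement) =====
-- stated objective: alternative
-- what changed: Replaces the incremental dict-bucketing loop (test membership, append or create per element) by a dedup-then-collect scheme: compute every host once, deduplicate them in first-seen order, and build each group with a single filtering comprehension.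
import Mathlib
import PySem

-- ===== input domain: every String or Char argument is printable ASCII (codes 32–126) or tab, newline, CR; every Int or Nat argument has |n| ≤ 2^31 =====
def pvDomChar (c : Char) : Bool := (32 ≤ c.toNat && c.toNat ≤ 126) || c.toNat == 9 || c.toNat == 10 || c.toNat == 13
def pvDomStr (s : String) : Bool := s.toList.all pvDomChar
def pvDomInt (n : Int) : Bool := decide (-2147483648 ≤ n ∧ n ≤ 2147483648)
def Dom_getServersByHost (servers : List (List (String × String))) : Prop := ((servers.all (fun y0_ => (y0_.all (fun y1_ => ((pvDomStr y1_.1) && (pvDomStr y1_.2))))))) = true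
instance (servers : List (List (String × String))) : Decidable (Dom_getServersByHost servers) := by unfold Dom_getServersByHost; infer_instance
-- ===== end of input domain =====

-- B replaces the incremental dict-bucketing loop by dedup-then-collect: distinct hosts
-- in first-seen order, then one filtering pass per host (alternative decomposition).


-- ===== PORT A =====
-- hostFromServer: "k in server" / server[k] on an assoc-list dict = first match
def pvLookup (server : List (String × String)) (k : String) : Option String :=
  (server.find? (fun p => p.1 == k)).map (·.2)

-- the assert's failing case (neither key) is excluded by Pre_; "" is a dummy there
def pvHost (server : List (String × String)) : String :=
  match pvLookup server "ipv6" with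
  | some v => v
  | none => (pvLookup server "ipv4").getD ""

def getServersByHost (servers : List (List (String × String))) : List (String × List (List (String × String))) :=
  (servers.foldl (fun d s =>
      let h := pvHost s
      if d.contains h then d.insert h (d.getD h [] ++ [s]) else d.insert h [s])
    PySem.Dict.empty).items

-- ===== PORT B =====
def getServersByHost_alt (servers : List (List (String × String))) : List (String × List (List (String × String))) :=
  let hosts := servers.map pvHost
  (PySem.List.dedup hosts).map (fun h =>
    (h, ((servers.zip hosts).filter (fun p => p.2 == h)).map (·.1)))

-- ===== PRECONDITION & SPEC =====
-- Pre_ excludes exactly the inputs where some server has neither "ipv6" nor "ipv4",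
-- on which A's assert raises AssertionError.
def Pre_getServersByHost (servers : List (List (String × String))) : Prop :=
  (servers.all (fun srv => srv.any (fun p => p.1 == "ipv6" || p.1 == "ipv4"))) = true
instance (servers : List (List (String × String))) : Decidable (Pre_getServersByHost servers) := by unfold Pre_getServersByHost; infer_instance
def pvWitness_getServersByHost : (List (List (String × String))) := [[("ipv4", "1.2.3.4")], [("ipv6", "::1")]]

def Spec_getServersByHost (servers : List (List (String × String))) (out : List (String × List (List (String × String)))) : Prop := out = getServersByHost_alt servers
instance (servers : List (List (String × String))) (out : List (String × List (List (String × String)))) : Decidable (Spec_getServersByHost servers out) := by unfold Spec_getServersByHost; infer_instance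

-- ===== CLAIM (what is proved, stated in full; the proofs are below) =====
def Claim_equal_getServersByHost : Prop := ∀ (servers : List (List (String × String))), Dom_getServersByHost servers → Pre_getServersByHost servers → Spec_getServersByHost servers (getServersByHost servers)

-- ===== LEMMAS AND PROOFS =====

-- A's loop body is Dict.modify with default []
lemma stepA_eq_modify (d : PySem.Dict String (List (List (String × String)))) (s : List (String × String)) :
    (let h := pvHost s
     if d.contains h then d.insert h (d.getD h [] ++ [s]) else d.insert h [s]) =
    d.modify (pvHost s) [] (· ++ [s]) := by
  by_cases hc : d.contains (pvHost s) = true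
  · simp [hc, PySem.Dict.modify]
  · simp only [Bool.not_eq_true] at hc
    simp [hc, PySem.Dict.modify, PySem.Dict.getD_of_not_contains (h := hc)]

lemma filter_map_pair (servers : List (List (String × String))) (k : String) :
    (((servers.map (fun s => (pvHost s, s))).filter (fun p => p.1 == k)).map (·.2)) =
    servers.filter (fun s => pvHost s == k) := by
  induction servers with
  | nil => rfl
  | cons s t ih =>
      by_cases h : pvHost s == k <;> simp [h, ih]

lemma filter_zip_pair (servers : List (List (String × String))) (k : String) :
    (((servers.zip (servers.map pvHost)).filter (fun p => p.2 == k)).map (·.1)) =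
    servers.filter (fun s => pvHost s == k) := by
  induction servers with
  | nil => rfl
  | cons s t ih =>
      by_cases h : pvHost s == k <;> simp [h, ih]

-- ===== VERDICT (by name: the statement is the Claim_ definition above) =====
theorem getServersByHost_spec : Claim_equal_getServersByHost := by
  intro servers _ _
  unfold Spec_getServersByHost getServersByHost getServersByHost_alt
  have hfold : servers.foldl (fun d s =>
      let h := pvHost s
      if d.contains h then d.insert h (d.getD h [] ++ [s]) else d.insert h [s])
      (PySem.Dict.empty : PySem.Dict String (List (List (String × String)))) =
      (servers.map (fun s => (pvHost s, s))).foldl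
        (fun d p => d.modify p.1 [] (· ++ [p.2])) PySem.Dict.empty := by
    rw [List.foldl_map]
    exact PySem.List.foldl_congr_mem _ _ _ _ (fun d s _ => stepA_eq_modify d s)
  rw [hfold]
  have hnd : ((servers.map (fun s => (pvHost s, s))).foldl
      (fun d p => d.modify p.1 [] (· ++ [p.2])) PySem.Dict.empty).keys.Nodup := by
    simpa using PySem.Dict.nodup_keys_foldl_modify_key
      (servers.map (fun s => (pvHost s, s))) (·.1) []
      (fun _ p => (· ++ [p.2])) PySem.Dict.empty (by simp)
  rw [PySem.Dict.items_eq_map_keys _ hnd []]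
  have hkeys : ((servers.map (fun s => (pvHost s, s))).foldl
      (fun d p => d.modify p.1 [] (· ++ [p.2])) PySem.Dict.empty).keys =
      PySem.List.dedup (servers.map pvHost) := by
    rw [PySem.Dict.keys_foldl_modify_key]
    simp [PySem.Set.update_nil_left, List.map_map, Function.comp_def]
  rw [hkeys]
  apply List.map_congr_left
  intro k _
  rw [PySem.Dict.getD_foldl_modify_append, filter_map_pair, filter_zip_pair]
  simp [PySem.Dict.getD_empty]
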